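-- pv_equiv track=rewrite | github.com/droaas/Quranic | nho.py | group_phrase_elements
-- ===== SOURCE A (Python) =====
-- def group_phrase_elements(numbers,elements):
--     grouped_elements = []
--     for current_number in numbers:
--         if current_number != 0:
--             if not grouped_elements or current_number != grouped_elements[-1][0]:
--                 grouped_elements.append([current_number])
--             else:
--                 grouped_elements[-1].append(current_number)
--         else:
--             grouped_elements.append([0])
--     lengths=[len(i) for i in grouped_elements]
--     result = [];  index = 0
--     for length in lengths:
--         result.append(elements[index:index + length])
--         index += length
--     phrase=' '.join([''.join(i) for i in result])
--     return phrase
-- ===== SOURCE B (Python) =====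
-- def group_phrase_elements(numbers, elements):
--     segments = []
--     prev = None
--     for i, n in enumerate(numbers):
--         ch = elements[i] if i < len(elements) else ''
--         if n == 0 or not segments or n != prev:
--             segments.append([ch])
--         else:
--             segments[-1].append(ch)
--         prev = n
--     return ' '.join(''.join(seg) for seg in segments)
-- ===== Notes on version B (the rewrite author's own statement) =====
-- stated objective: simpler
-- what changed: A builds grouped number-lists in one loop, takes their lengths in a second pass and slices elements by a running index in a third; B does a single pass over enumerate(numbers), starting or extending the current element segment directly, with no intermediate number groups, lengths list or slicing.
import Mathlib
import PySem

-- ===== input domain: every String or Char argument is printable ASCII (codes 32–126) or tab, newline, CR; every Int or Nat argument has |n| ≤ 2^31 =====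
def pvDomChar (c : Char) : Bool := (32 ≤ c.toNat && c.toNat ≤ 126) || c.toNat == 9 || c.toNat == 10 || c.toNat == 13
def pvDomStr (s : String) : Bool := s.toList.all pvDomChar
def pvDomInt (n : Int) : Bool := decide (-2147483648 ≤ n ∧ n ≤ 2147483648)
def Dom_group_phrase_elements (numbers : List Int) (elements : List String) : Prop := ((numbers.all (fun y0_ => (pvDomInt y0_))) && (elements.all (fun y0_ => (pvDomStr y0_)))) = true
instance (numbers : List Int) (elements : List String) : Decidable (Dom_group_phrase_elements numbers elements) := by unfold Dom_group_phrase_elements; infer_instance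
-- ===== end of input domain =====

-- B replaces A's three passes (group numbers into lists, take lengths, slice elements by running index)
-- with one combined pass over enumerate(numbers) that builds the element segments directly; objective: simpler.


-- ===== PORT A =====
-- one iteration of A's grouping loop; Python's grouped_elements[-1][0] is ported with
-- pyGetD … 0 0 (the groups A builds are always nonempty, so the defaults are never reached)
def aStep (gs : List (List Int)) (current_number : Int) : List (List Int) :=
  if current_number ≠ 0 then
    if gs = [] ∨ current_number ≠ PySem.List.pyGetD (gs.getLast?.getD []) 0 0 then
      gs ++ [[current_number]]
    else
      gs.dropLast ++ [(gs.getLast?.getD []) ++ [current_number]]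
  else gs ++ [[0]]

-- one iteration of A's slicing loop (state = (result, index))
def sliceStep (elements : List String) (p : List (List String) × Int) (length : Int) : List (List String) × Int :=
  (p.1 ++ [PySem.List.slice elements (some p.2) (some (p.2 + length))], p.2 + length)

def group_phrase_elements (numbers : List Int) (elements : List String) : String :=
  let grouped_elements := numbers.foldl aStep []
  let lengths := grouped_elements.map (fun i => (i.length : Int))
  let rp := lengths.foldl (sliceStep elements) ([], 0)
  PySem.Str.join " " (rp.1.map (fun i => PySem.Str.join "" i))

-- ===== PORT B =====
-- one iteration of B's single combined loop; state = (segments, prev); p = (i, n) from enumerate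
def bStep (elements : List String) (st : List (List String) × Option Int) (p : Int × Int) :
    List (List String) × Option Int :=
  let ch := if p.1 < (elements.length : Int) then PySem.List.pyGetD elements p.1 "" else ""
  if p.2 = 0 ∨ st.1 = [] ∨ some p.2 ≠ st.2 then
    (st.1 ++ [[ch]], some p.2)
  else
    (st.1.dropLast ++ [(st.1.getLast?.getD []) ++ [ch]], some p.2)

def group_phrase_elements_alt (numbers : List Int) (elements : List String) : String :=
  let st := (PySem.List.enumerate numbers 0).foldl (bStep elements) ([], none)
  PySem.Str.join " " (st.1.map (fun seg => PySem.Str.join "" seg))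

-- ===== PRECONDITION & SPEC =====
def Spec_group_phrase_elements (numbers : List Int) (elements : List String) (out : String) : Prop := out = group_phrase_elements_alt numbers elements
instance (numbers : List Int) (elements : List String) (out : String) : Decidable (Spec_group_phrase_elements numbers elements out) := by unfold Spec_group_phrase_elements; infer_instance

-- ===== CLAIM (what is proved, stated in full; the proofs are below) =====
def Claim_equal_group_phrase_elements : Prop := ∀ (numbers : List Int) (elements : List String), Dom_group_phrase_elements numbers elements → Spec_group_phrase_elements numbers elements (group_phrase_elements numbers elements)

-- ===== LEMMAS AND PROOFS =====

-- the character fetched by B at position i (Nat form used by the proofs)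
def chAt (elements : List String) (i : Nat) : String :=
  if (i : Int) < (elements.length : Int) then PySem.List.pyGetD elements (i : Int) "" else ""

-- join "" of the k (padded) element strings starting at position i
def padStr (elements : List String) (i : Nat) : Nat → String
  | 0 => ""
  | k + 1 => chAt elements i ++ padStr elements (i + 1) k

-- (value, length) run decomposition induced by A's grouping, state = current run (v, k)
def runsGo (v : Int) (k : Nat) : List Int → List (Int × Nat)
  | [] => [(v, k)]
  | n :: t => if n = 0 ∨ n ≠ v then (v, k) :: runsGo n 1 t else runsGo v (k + 1) t

-- A's slice pass, recursively
def sliceBy (elements : List String) : List Int → Int → List (List String)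
  | [], _ => []
  | l :: ls, idx => PySem.List.slice elements (some idx) (some (idx + l)) :: sliceBy elements ls (idx + l)

-- the joined string of each run, runs laid out from position i
def runStrings (elements : List String) : List (Int × Nat) → Nat → List String
  | [], _ => []
  | p :: rs, i => padStr elements i p.2 :: runStrings elements rs (i + p.2)

-- B's segment pass, recursively; state = current segment cur
def segsGo (elements : List String) (v : Int) (cur : List String) (i : Nat) : List Int → List (List String)
  | [] => [cur]
  | n :: t => if n = 0 ∨ n ≠ v then cur :: segsGo elements n [chAt elements i] (i + 1) t
              else segsGo elements v (cur ++ [chAt elements i]) (i + 1) t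

-- the same with each segment already joined; common normal form of both sides
def strsGo (elements : List String) (v : Int) (s : String) (i : Nat) : List Int → List String
  | [] => [s]
  | n :: t => if n = 0 ∨ n ≠ v then s :: strsGo elements n (chAt elements i) (i + 1) t
              else strsGo elements v (s ++ chAt elements i) (i + 1) t

theorem charsJoin_nil_eq_flatten (L : List (List Char)) : PySem.Chars.join [] L = L.flatten := by
  match L with
  | [] => simp [PySem.Chars.join_nil]
  | [p] => simp [PySem.Chars.join_singleton]
  | p :: q :: rest =>
    rw [PySem.Chars.join_cons_cons, charsJoin_nil_eq_flatten (q :: rest)]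
    simp

theorem joinE_nil : PySem.Str.join "" ([] : List String) = "" := by
  apply String.toList_inj.mp; simp

theorem joinE_cons (s : String) (l : List String) :
    PySem.Str.join "" (s :: l) = s ++ PySem.Str.join "" l := by
  apply String.toList_inj.mp; simp [charsJoin_nil_eq_flatten]

theorem joinE_singleton (s : String) : PySem.Str.join "" [s] = s := by
  apply String.toList_inj.mp; simp

theorem joinE_concat (l : List String) (s : String) :
    PySem.Str.join "" (l ++ [s]) = PySem.Str.join "" l ++ s := by
  apply String.toList_inj.mp; simp [charsJoin_nil_eq_flatten]

theorem padStr_succ_right (elements : List String) (i k : Nat) :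
    padStr elements i (k + 1) = padStr elements i k ++ chAt elements (i + k) := by
  induction k generalizing i with
  | zero =>
    apply String.toList_inj.mp; simp [padStr]
  | succ k ih =>
    show chAt elements i ++ padStr elements (i + 1) (k + 1) = _
    rw [ih (i + 1)]
    apply String.toList_inj.mp
    simp [padStr, Nat.add_assoc, Nat.add_comm 1 k]

-- A's grouping fold computes the run decomposition
theorem foldl_aStep (t : List Int) (pre : List (List Int)) (v : Int) (k : Nat) (hk : 0 < k) :
    t.foldl aStep (pre ++ [List.replicate k v]) =
      pre ++ (runsGo v k t).map (fun p => List.replicate p.2 p.1) := by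
  induction t generalizing pre v k with
  | nil => simp [runsGo]
  | cons n t ih =>
    obtain ⟨m, rfl⟩ : ∃ m, k = m + 1 := ⟨k - 1, by omega⟩
    have hlast : (pre ++ [List.replicate (m + 1) v]).getLast?.getD [] = List.replicate (m + 1) v := by
      simp
    have hhead : PySem.List.pyGetD (List.replicate (m + 1) v) 0 0 = v := by
      simp [List.replicate_succ, PySem.List.pyGetD_zero]
    by_cases hc : n = 0 ∨ n ≠ v
    · have hstep : aStep (pre ++ [List.replicate (m + 1) v]) n =
          (pre ++ [List.replicate (m + 1) v]) ++ [List.replicate 1 n] := by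
      -- new group (n = 0, or n differs from the head of the last group)
        rcases hc with h0 | hne
        · subst h0; simp [aStep]
        · by_cases hz : n = 0
          · subst hz; simp [aStep]
          · simp [aStep, hz, hhead, hne]
      rw [List.foldl_cons, hstep, ih _ n 1 (by omega)]
      simp [runsGo, hc]
    · push Not at hc
      obtain ⟨h0, hv⟩ := hc
      subst hv
      have hstep : aStep (pre ++ [List.replicate (m + 1) n]) n =
          pre ++ [List.replicate (m + 1 + 1) n] := by
        have hcond : ¬ (pre ++ [List.replicate (m + 1) n] = [] ∨
            n ≠ PySem.List.pyGetD ((pre ++ [List.replicate (m + 1) n]).getLast?.getD []) 0 0) := by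
          simp [hhead]
        simp only [aStep]
        rw [if_pos h0, if_neg hcond, hlast, List.dropLast_concat, ← List.replicate_succ']
      rw [List.foldl_cons, hstep, ih pre n (m + 1 + 1) (by omega)]
      simp [runsGo, h0]

-- A's slicing fold, recursively
theorem foldl_sliceStep (elements : List String) (lens : List Int) (res : List (List String)) (idx : Int) :
    (lens.foldl (sliceStep elements) (res, idx)).1 = res ++ sliceBy elements lens idx := by
  induction lens generalizing res idx with
  | nil => simp [sliceBy]
  | cons l ls ih =>
    simp only [List.foldl_cons, sliceStep]
    rw [ih]
    simp [sliceBy]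

-- joining a slice equals the padded concatenation of B's per-position strings
theorem join_slice (elements : List String) (k i : Nat) :
    PySem.Str.join "" (PySem.List.slice elements (some (i : Int)) (some ((i : Int) + (k : Int)))) =
      padStr elements i k := by
  rw [PySem.List.slice_natCast_add]
  induction k generalizing i with
  | zero => simp [padStr, joinE_nil]
  | succ k ih =>
    by_cases h : i < elements.length
    · rw [List.drop_eq_getElem_cons h, List.take_succ_cons, joinE_cons]
      have hch : chAt elements i = elements[i] := by
        simp [chAt, PySem.List.pyGetD_natCast, List.getD_eq_getElem?_getD, h]
      rw [padStr, hch, ← ih (i + 1)]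
    · have hd : List.drop i elements = [] := List.drop_eq_nil_of_le (by omega)
      have hd1 : List.drop (i + 1) elements = [] := List.drop_eq_nil_of_le (by omega)
      have hpad : padStr elements (i + 1) k = "" := by rw [← ih (i + 1), hd1]; simp [joinE_nil]
      have hch : chAt elements i = "" := by simp [chAt]; omega
      rw [padStr, hch, hpad, hd]
      apply String.toList_inj.mp; simp

-- mapping join over A's slices gives the run strings
theorem sliceBy_runStrings (elements : List String) (rs : List (Int × Nat)) (i : Nat) :
    (sliceBy elements (rs.map fun p => ((p.2 : Nat) : Int)) (i : Int)).map (PySem.Str.join "") =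
      runStrings elements rs i := by
  induction rs generalizing i with
  | nil => simp [sliceBy, runStrings]
  | cons p rs ih =>
    rw [List.map_cons]
    show (PySem.List.slice elements (some (i : Int)) (some ((i : Int) + (p.2 : Int))) ::
        sliceBy elements _ ((i : Int) + (p.2 : Int))).map _ = _
    have hc : (i : Int) + (p.2 : Int) = ((i + p.2 : Nat) : Int) := by push_cast; ring
    rw [List.map_cons, join_slice, hc, ih (i + p.2)]
    simp [runStrings]

-- B's fold computes segsGo
theorem foldl_bStep (elements : List String) (t : List Int) (pre : List (List String))
    (v : Int) (cur : List String) (i : Nat) :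
    ((PySem.List.enumerate t (i : Int)).foldl (bStep elements) (pre ++ [cur], some v)).1 =
      pre ++ segsGo elements v cur i t := by
  induction t generalizing pre v cur i with
  | nil => simp [PySem.List.enumerate, segsGo]
  | cons n t ih =>
    rw [PySem.List.enumerate_cons, List.foldl_cons]
    have hcast : (i : Int) + 1 = ((i + 1 : Nat) : Int) := by push_cast; ring
    have hch : (if (i : Int) < (elements.length : Int) then PySem.List.pyGetD elements (i : Int) "" else "") =
        chAt elements i := rfl
    by_cases hc : n = 0 ∨ n ≠ v
    · have hcond : n = 0 ∨ pre ++ [cur] = [] ∨ some n ≠ some v := by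
        rcases hc with h | h
        · exact Or.inl h
        · exact Or.inr (Or.inr (by simpa using h))
      have hstep : bStep elements (pre ++ [cur], some v) ((i : Int), n) =
          ((pre ++ [cur]) ++ [[chAt elements i]], some n) := by
        simp only [bStep, hch]; rw [if_pos hcond]
      rw [hstep, hcast, ih (pre ++ [cur]) n [chAt elements i] (i + 1)]
      simp [segsGo, hc]
    · push Not at hc
      obtain ⟨h0, hv⟩ := hc
      subst hv
      have hcond : ¬ (n = 0 ∨ pre ++ [cur] = [] ∨ some n ≠ some n) := by simp [h0]
      have hstep : bStep elements (pre ++ [cur], some n) ((i : Int), n) =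
          (pre ++ [cur ++ [chAt elements i]], some n) := by
        simp only [bStep, hch]; rw [if_neg hcond]
        simp
      rw [hstep, hcast, ih pre n (cur ++ [chAt elements i]) (i + 1)]
      simp [segsGo, h0]

-- joining B's segments gives strsGo
theorem segsGo_strsGo (elements : List String) (t : List Int) (v : Int) (cur : List String) (i : Nat) :
    (segsGo elements v cur i t).map (PySem.Str.join "") =
      strsGo elements v (PySem.Str.join "" cur) i t := by
  induction t generalizing v cur i with
  | nil => simp [segsGo, strsGo]
  | cons n t ih =>
    by_cases hc : n = 0 ∨ n ≠ v
    · simp only [segsGo, strsGo, if_pos hc, List.map_cons, ih, joinE_singleton]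
    · simp only [segsGo, strsGo, if_neg hc, ih, joinE_concat]

-- A's run strings coincide with B's strsGo
theorem runStrings_strsGo (elements : List String) (t : List Int) (v : Int) (k i : Nat) :
    runStrings elements (runsGo v k t) i = strsGo elements v (padStr elements i k) (i + k) t := by
  induction t generalizing v k i with
  | nil => simp [runsGo, runStrings, strsGo]
  | cons n t ih =>
    by_cases hc : n = 0 ∨ n ≠ v
    · rw [runsGo, if_pos hc, runStrings, ih n 1 (i + k)]
      have h1 : padStr elements (i + k) 1 = chAt elements (i + k) := by
        apply String.toList_inj.mp; simp [padStr]
      rw [strsGo, if_pos hc, h1]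
    · rw [runsGo, if_neg hc, ih v (k + 1) i, strsGo, if_neg hc, padStr_succ_right]
      ring_nf

theorem aStep_nil (n : Int) : aStep [] n = [[n]] := by
  by_cases h : n = 0
  · subst h; simp [aStep]
  · simp [aStep, h]

theorem group_phrase_eq (numbers : List Int) (elements : List String) :
    group_phrase_elements numbers elements = group_phrase_elements_alt numbers elements := by
  cases numbers with
  | nil =>
    simp [group_phrase_elements, group_phrase_elements_alt, PySem.List.enumerate]
  | cons n t =>
    simp only [group_phrase_elements, group_phrase_elements_alt]
    -- A side
    have hA1 : (n :: t).foldl aStep [] =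
        (runsGo n 1 t).map (fun p => List.replicate p.2 p.1) := by
      rw [List.foldl_cons, aStep_nil]
      have : ([[n]] : List (List Int)) = [] ++ [List.replicate 1 n] := by simp
      rw [this, foldl_aStep t [] n 1 (by omega)]
      simp
    have hA2 : ((runsGo n 1 t).map (fun p => List.replicate p.2 p.1)).map
        (fun i => ((i : List Int).length : Int)) = (runsGo n 1 t).map (fun p => ((p.2 : Nat) : Int)) := by
      simp [List.map_map, Function.comp]
    -- B side
    have hB1 : (PySem.List.enumerate (n :: t) 0).foldl (bStep elements) ([], none) =
        ((PySem.List.enumerate t ((1 : Nat) : Int)).foldl (bStep elements)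
          ([] ++ [[chAt elements 0]], some n)) := by
      rw [PySem.List.enumerate_cons, List.foldl_cons]
      have hstep : bStep elements ([], none) ((0 : Int), n) = ([[chAt elements 0]], some n) := by
        simp [bStep, chAt]
      rw [hstep]
      norm_num
    rw [hA1, hA2, hB1, foldl_bStep elements t [] n [chAt elements 0] 1]
    have h0 : (0 : Int) = ((0 : Nat) : Int) := rfl
    rw [foldl_sliceStep elements _ [] 0, List.nil_append, h0,
      sliceBy_runStrings elements (runsGo n 1 t) 0,
      runStrings_strsGo elements t n 1 0, List.nil_append,
      segsGo_strsGo elements t n [chAt elements 0] 1, joinE_singleton]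
    have hp : padStr elements 0 1 = chAt elements 0 := by
      apply String.toList_inj.mp; simp [padStr]
    rw [hp]

-- ===== VERDICT (by name: the statement is the Claim_ definition above) =====
theorem group_phrase_elements_spec : Claim_equal_group_phrase_elements := by
  intro numbers elements _
  unfold Spec_group_phrase_elements
  exact group_phrase_eq numbers elements
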